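-- pv_equiv track=rewrite | github.com/wangevan6/ARPO | evaluation/src/tools/search_tool_sds.py | get_truncated_prev_reasoning
-- ===== SOURCE A (Python) =====
-- def get_truncated_prev_reasoning(reasoning_logs):
--     assert len(reasoning_logs) > 0
--     if type(reasoning_logs[0]) == dict:
--         reasoning_logs = [message["content"] for message in reasoning_logs]
--     prev_steps = [f"Step {i + 1}: {step}" for i, step in enumerate(reasoning_logs)]
--
--     if len(prev_steps) <= 5:
--         truncated_prev_reasoning = "\n\n".join(prev_steps)
--     else:
--         truncated_prev_reasoning = ""
--         for i, step in enumerate(prev_steps):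
--             if (
--                 i == 0
--                 or i >= len(prev_steps) - 4
--                 or ("<search>" in step and "</search>" in step)
--                 or (
--                     "<result>" in step
--                     and "</result>" in step
--                     and "<search>" in prev_steps[i - 1]
--                 )
--             ):
--                 truncated_prev_reasoning += step + "\n\n"
--             else:
--                 if truncated_prev_reasoning[-len("\n\n...\n\n") :] != "\n\n...\n\n":
--                     truncated_prev_reasoning += "...\n\n"
--     truncated_prev_reasoning = truncated_prev_reasoning.strip("\n")
--     return truncated_prev_reasoning
-- ===== SOURCE B (Python) =====
-- def get_truncated_prev_reasoning(reasoning_logs):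
--     assert len(reasoning_logs) > 0
--     if type(reasoning_logs[0]) == dict:
--         reasoning_logs = [message["content"] for message in reasoning_logs]
--     steps = ["Step %d: %s" % (i + 1, s) for i, s in enumerate(reasoning_logs)]
--     n = len(steps)
--     if n <= 5:
--         return "\n\n".join(steps).strip("\n")
--
--     def kept(i):
--         return (
--             i == 0
--             or i >= n - 4
--             or ("<search>" in steps[i] and "</search>" in steps[i])
--             or ("<result>" in steps[i] and "</result>" in steps[i]
--                 and "<search>" in steps[i - 1])
--         )
--
--     # indices of the surviving steps (0 and n-1 are always among them)
--     ks = [i for i in range(n) if kept(i)]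
--     parts = []
--     for a, b in zip(ks, ks[1:]):
--         parts.append(steps[a])
--         if b - a > 1:
--             parts.append("...")
--     parts.append(steps[ks[-1]])
--     return "\n\n".join(parts).strip("\n")
-- ===== Notes on version B (the rewrite author's own statement) =====
-- stated objective: alternative
-- what changed: A builds the output in one forward pass over all steps, growing a single string and deciding whether to emit '...' by inspecting the last 7 characters of the string built so far; B never iterates over dropped steps at all: it computes the list of kept indices, then walks consecutive pairs of kept indices, emitting each kept step and one '...' exactly when the index gap exceeds 1, and joins once.
-- intended difference: On inputs with more than 5 steps where some kept step's text ends in '\n\n...' and the following step is dropped, A's last-7-characters test is fooled by the step's own text and silently omits the '...' truncation marker for that dropped run, while B emits the marker, which is the intended behaviour. — e.g. on get_truncated_prev_reasoning(["\n\n...", "", "", "", "", ""]): A returns "Step 1: \n\n...\n\nStep 3: \n\nStep 4: \n\nStep 5: \n\nStep 6: ", B returns "Step 1: \n\n...\n\n...\n\nStep 3: \n\nStep 4: \n\nStep 5: \n\nStep 6: "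
import Mathlib
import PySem

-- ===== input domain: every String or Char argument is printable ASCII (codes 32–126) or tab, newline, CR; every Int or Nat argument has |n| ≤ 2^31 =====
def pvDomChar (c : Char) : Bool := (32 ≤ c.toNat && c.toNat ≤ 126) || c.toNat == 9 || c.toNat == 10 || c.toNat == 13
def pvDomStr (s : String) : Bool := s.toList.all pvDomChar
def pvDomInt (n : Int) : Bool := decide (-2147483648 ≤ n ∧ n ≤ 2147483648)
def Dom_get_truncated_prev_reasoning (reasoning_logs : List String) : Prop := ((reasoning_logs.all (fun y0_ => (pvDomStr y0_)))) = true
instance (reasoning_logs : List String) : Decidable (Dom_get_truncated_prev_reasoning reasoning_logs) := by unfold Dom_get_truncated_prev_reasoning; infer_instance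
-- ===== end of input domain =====

-- B replaces A's single forward pass (one growing string whose own last 7 characters decide
-- ellipsis suppression) by a kept-index computation: it lists the indices of surviving steps and
-- emits one "..." per gap between consecutive kept indices, never iterating over dropped steps; on
-- the corner inputs where a kept step's own text ends in "\n\n..." the two differ (see D_ below).
-- A mutates nothing; the equivalence is about the return value.

-- ===== PORT A =====
def get_truncated_prev_reasoning (reasoning_logs : List String) : String :=
  let prev_steps := (PySem.List.enumerate reasoning_logs).map
      (fun p => "Step " ++ PySem.Int.toStr (p.1 + 1) ++ ": " ++ p.2)
  let truncated :=
    if prev_steps.length ≤ 5 then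
      PySem.Str.join "\n\n" prev_steps
    else
      (PySem.List.enumerate prev_steps).foldl (fun acc p =>
        if p.1 == 0 || decide ((prev_steps.length : Int) - 4 ≤ p.1)
            || (PySem.Str.isIn "<search>" p.2 && PySem.Str.isIn "</search>" p.2)
            || (PySem.Str.isIn "<result>" p.2 && PySem.Str.isIn "</result>" p.2
                && PySem.Str.isIn "<search>" (PySem.List.pyGetD prev_steps (p.1 - 1) ""))
        then acc ++ p.2 ++ "\n\n"
        else if PySem.Str.slice acc (some (-7)) none ≠ "\n\n...\n\n" then acc ++ "...\n\n"
        else acc) ""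
  PySem.Str.stripChars truncated "\n"

-- ===== PORT B =====
def get_truncated_prev_reasoning_alt (reasoning_logs : List String) : String :=
  let steps := (PySem.List.enumerate reasoning_logs).map
      (fun p => "Step " ++ PySem.Int.toStr (p.1 + 1) ++ ": " ++ p.2)
  let n : Int := steps.length
  if steps.length ≤ 5 then
    PySem.Str.stripChars (PySem.Str.join "\n\n" steps) "\n"
  else
    let kept := fun (i : Int) =>
      i == 0 || decide (n - 4 ≤ i)
      || (PySem.Str.isIn "<search>" (PySem.List.pyGetD steps i "")
          && PySem.Str.isIn "</search>" (PySem.List.pyGetD steps i ""))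
      || (PySem.Str.isIn "<result>" (PySem.List.pyGetD steps i "")
          && PySem.Str.isIn "</result>" (PySem.List.pyGetD steps i "")
          && PySem.Str.isIn "<search>" (PySem.List.pyGetD steps (i - 1) ""))
    let ks := (PySem.List.pyRange 0 n 1).filter kept
    let parts := (ks.zip ks.tail).foldl (fun parts ab =>
        let parts := parts ++ [PySem.List.pyGetD steps ab.1 ""]
        if 1 < ab.2 - ab.1 then parts ++ ["..."] else parts) []
    let parts := parts ++ [PySem.List.pyGetD steps (PySem.List.pyGetD ks (-1) 0) ""]
    PySem.Str.stripChars (PySem.Str.join "\n\n" parts) "\n"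

-- ===== PRECONDITION & SPEC =====
-- Pre_ excludes only the empty list, on which A's `assert len(reasoning_logs) > 0` raises AssertionError.
def Pre_get_truncated_prev_reasoning (reasoning_logs : List String) : Prop := reasoning_logs ≠ []
instance (reasoning_logs : List String) : Decidable (Pre_get_truncated_prev_reasoning reasoning_logs) := by unfold Pre_get_truncated_prev_reasoning; infer_instance
def pvWitness_get_truncated_prev_reasoning : List String := ["a"]

-- closed-form description of which steps survive the truncation: first step, last four steps,
-- steps containing a complete search tag pair, result-tagged steps whose predecessor opened a search
def pvKeptD (L : List String) (i : Nat) : Prop :=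
  i = 0 ∨ L.length ≤ i + 4
  ∨ PySem.Str.isIn "<search>" (L.getD i "") ∧ PySem.Str.isIn "</search>" (L.getD i "")
  ∨ PySem.Str.isIn "<result>" (L.getD i "") ∧ PySem.Str.isIn "</result>" (L.getD i "")
      ∧ PySem.Str.isIn "<search>" (L.getD (i - 1) "")

-- On inputs where some kept step's text ends in "\n\n..." and the next step is dropped, A silently
-- omits the "..." ellipsis for that dropped run (its last-7-characters test is fooled by the step's
-- own text), while B emits the ellipsis, which is the intended truncation marker.
def D_get_truncated_prev_reasoning (reasoning_logs : List String) : Prop :=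
  ∃ i < reasoning_logs.length, pvKeptD reasoning_logs i ∧ ¬ pvKeptD reasoning_logs (i + 1)
    ∧ PySem.Str.endswith (reasoning_logs.getD i "") "\n\n..."
instance (reasoning_logs : List String) : Decidable (D_get_truncated_prev_reasoning reasoning_logs) := by unfold D_get_truncated_prev_reasoning pvKeptD; infer_instance

def Spec_get_truncated_prev_reasoning (reasoning_logs : List String) (out : String) : Prop := ¬ D_get_truncated_prev_reasoning reasoning_logs → out = get_truncated_prev_reasoning_alt reasoning_logs
instance (reasoning_logs : List String) (out : String) : Decidable (Spec_get_truncated_prev_reasoning reasoning_logs out) := by unfold Spec_get_truncated_prev_reasoning; infer_instance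

def pvDiffWitness_get_truncated_prev_reasoning : List String := ["\n\n...", "", "", "", "", ""]
def pvDiffWitnessOut_get_truncated_prev_reasoning : String × String :=
  ("Step 1: \n\n...\n\nStep 3: \n\nStep 4: \n\nStep 5: \n\nStep 6: ",
   "Step 1: \n\n...\n\n...\n\nStep 3: \n\nStep 4: \n\nStep 5: \n\nStep 6: ")

-- ===== CLAIM (what is proved, stated in full; the proofs are below) =====
def Claim_unchanged_get_truncated_prev_reasoning : Prop := ∀ (reasoning_logs : List String), Dom_get_truncated_prev_reasoning reasoning_logs → Pre_get_truncated_prev_reasoning reasoning_logs → Spec_get_truncated_prev_reasoning reasoning_logs (get_truncated_prev_reasoning reasoning_logs)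
def Claim_changed_get_truncated_prev_reasoning : Prop := Dom_get_truncated_prev_reasoning (pvDiffWitness_get_truncated_prev_reasoning) ∧ Pre_get_truncated_prev_reasoning (pvDiffWitness_get_truncated_prev_reasoning) ∧ D_get_truncated_prev_reasoning (pvDiffWitness_get_truncated_prev_reasoning) ∧ get_truncated_prev_reasoning (pvDiffWitness_get_truncated_prev_reasoning) = pvDiffWitnessOut_get_truncated_prev_reasoning.1 ∧ get_truncated_prev_reasoning_alt (pvDiffWitness_get_truncated_prev_reasoning) = pvDiffWitnessOut_get_truncated_prev_reasoning.2 ∧ pvDiffWitnessOut_get_truncated_prev_reasoning.1 ≠ pvDiffWitnessOut_get_truncated_prev_reasoning.2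

def Claim_exact_get_truncated_prev_reasoning : Prop := ∀ (reasoning_logs : List String), Dom_get_truncated_prev_reasoning reasoning_logs → Pre_get_truncated_prev_reasoning reasoning_logs → D_get_truncated_prev_reasoning reasoning_logs → get_truncated_prev_reasoning reasoning_logs ≠ get_truncated_prev_reasoning_alt reasoning_logs

-- ===== LEMMAS AND PROOFS =====

-- proof-side names for the shared step list, the keep test, and the loop bodies of the two ports
def pvStepsP (logs : List String) : List String :=
  (PySem.List.enumerate logs).map (fun p => "Step " ++ PySem.Int.toStr (p.1 + 1) ++ ": " ++ p.2)

def pvK (ps : List String) (p : Int × String) : Bool :=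
  p.1 == 0 || decide ((ps.length : Int) - 4 ≤ p.1)
  || (PySem.Str.isIn "<search>" p.2 && PySem.Str.isIn "</search>" p.2)
  || (PySem.Str.isIn "<result>" p.2 && PySem.Str.isIn "</result>" p.2
      && PySem.Str.isIn "<search>" (PySem.List.pyGetD ps (p.1 - 1) ""))

def pvBodyA (ps : List String) (acc : String) (p : Int × String) : String :=
  if pvK ps p then acc ++ p.2 ++ "\n\n"
  else if PySem.Str.slice acc (some (-7)) none ≠ "\n\n...\n\n" then acc ++ "...\n\n"
  else acc

-- the run-collapse loop body used as an INTERMEDIATE device by the proofs: the segment list it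
-- produces is shown equal both to A's accumulated string (pv_mega) and to B's gap-based parts
-- list (pv_parts_inv / pv_alt_eq)
def pvBodyB (segs : List String) (q : Bool × String) : List String :=
  if q.1 then segs ++ [q.2]
  else if segs.isEmpty || PySem.List.pyGetD segs (-1) "" ≠ "..." then segs ++ ["..."]
  else segs

def pvBodyB' (ps : List String) (segs : List String) (p : Int × String) : List String :=
  pvBodyB segs (pvK ps p, p.2)

-- names for port B's pieces
def pvKeptI (ps : List String) (i : Int) : Bool :=
  i == 0 || decide ((ps.length : Int) - 4 ≤ i)
  || (PySem.Str.isIn "<search>" (PySem.List.pyGetD ps i "")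
      && PySem.Str.isIn "</search>" (PySem.List.pyGetD ps i ""))
  || (PySem.Str.isIn "<result>" (PySem.List.pyGetD ps i "")
      && PySem.Str.isIn "</result>" (PySem.List.pyGetD ps i "")
      && PySem.Str.isIn "<search>" (PySem.List.pyGetD ps (i - 1) ""))

def pvBodyI (ps : List String) (acc : List String) (ab : Int × Int) : List String :=
  let acc := acc ++ [PySem.List.pyGetD ps ab.1 ""]
  if 1 < ab.2 - ab.1 then acc ++ ["..."] else acc

def pvBodyN (ps : List String) (acc : List String) (ab : Nat × Nat) : List String :=
  let acc := acc ++ [ps.getD ab.1 ""]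
  if ab.1 + 1 < ab.2 then acc ++ ["..."] else acc

def pvPartsF (ps : List String) (ks : List Nat) : List String :=
  (ks.zip ks.tail).foldl (pvBodyN ps) []

def pvKb (ps : List String) (k : Nat) : Bool := pvK ps ((k : Int), ps.getD k "")

def pvKs (ps : List String) (K : Nat) : List Nat := (List.range K).filter (pvKb ps)

def pvJoinNN (segs : List String) : List Char :=
  (segs.map (fun s => s.toList ++ ['\n', '\n'])).flatten

lemma portA_eq (logs : List String) : get_truncated_prev_reasoning logs =
    PySem.Str.stripChars
      (if (pvStepsP logs).length ≤ 5 then PySem.Str.join "\n\n" (pvStepsP logs)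
       else (PySem.List.enumerate (pvStepsP logs)).foldl (pvBodyA (pvStepsP logs)) "") "\n" := rfl

lemma pv_alt_unfold (logs : List String) : get_truncated_prev_reasoning_alt logs =
    if (pvStepsP logs).length ≤ 5 then
      PySem.Str.stripChars (PySem.Str.join "\n\n" (pvStepsP logs)) "\n"
    else
      PySem.Str.stripChars (PySem.Str.join "\n\n"
        (((((PySem.List.pyRange 0 ((pvStepsP logs).length : Int) 1).filter
              (pvKeptI (pvStepsP logs))).zip
            ((PySem.List.pyRange 0 ((pvStepsP logs).length : Int) 1).filter
              (pvKeptI (pvStepsP logs))).tail).foldl (pvBodyI (pvStepsP logs)) [])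
         ++ [PySem.List.pyGetD (pvStepsP logs)
              (PySem.List.pyGetD ((PySem.List.pyRange 0 ((pvStepsP logs).length : Int) 1).filter
                (pvKeptI (pvStepsP logs))) (-1) 0) ""])) "\n" := rfl

lemma pv_str_ext {s t : String} (h : s.toList = t.toList) : s = t := by
  have := congrArg String.ofList h
  simpa using this

lemma pv_steps_length (logs : List String) : (pvStepsP logs).length = logs.length := by
  simp [pvStepsP, PySem.List.length_enumerate]

lemma pv_enum_getElem (l : List String) (k : Nat) (h : k < l.length) :
    (PySem.List.enumerate l)[k]'(by simpa [PySem.List.length_enumerate] using h)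
      = ((k : Int), l[k]) := by
  rw [PySem.List.getElem_enumerate]; simp

def pvStepP (i : Nat) (s : String) : String :=
  "Step " ++ PySem.Int.toStr ((i : Int) + 1) ++ ": " ++ s

def pvPrefix (i : Nat) : List Char :=
  "Step ".toList ++ PySem.Int.toChars ((i : Int) + 1) ++ ": ".toList

lemma pv_step_getD (logs : List String) (i : Nat) (hi : i < logs.length) :
    (pvStepsP logs).getD i "" = pvStepP i (logs.getD i "") := by
  have hlen : i < (pvStepsP logs).length := by rw [pv_steps_length]; exact hi
  rw [List.getD_eq_getElem _ _ hlen, List.getD_eq_getElem _ _ hi]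
  show ((PySem.List.enumerate logs).map _)[i]'_ = _
  rw [List.getElem_map, pv_enum_getElem logs i hi]
  rfl

lemma pv_shape (logs : List String) (i : Nat) (hi : i < logs.length) :
    ∃ u, ((pvStepsP logs).getD i "").toList = ['S', 't', 'e', 'p', ' '] ++ u := by
  rw [pv_step_getD logs i hi]
  refine ⟨(PySem.Int.toStr ((i : Int) + 1) ++ ": " ++ logs.getD i "").toList, ?_⟩
  simp [pvStepP, String.toList_append]

lemma pv_getD_toList (logs : List String) (i : Nat) (hi : i < logs.length) :
    ((pvStepsP logs).getD i "").toList = pvPrefix i ++ (logs.getD i "").toList := by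
  rw [pv_step_getD logs i hi]
  simp [pvStepP, pvPrefix, String.toList_append, PySem.Int.toList_toStr, List.append_assoc]

lemma pv_toDigitsCore_mem (b : Nat) :
    ∀ (f n : Nat) (acc : List Char) (c : Char), c ∈ Nat.toDigitsCore b f n acc →
      c ∈ acc ∨ ∃ m, c = Nat.digitChar m := by
  intro f
  induction f with
  | zero =>
    intro n acc c h
    exact Or.inl h
  | succ f ih =>
    intro n acc c h
    rw [show Nat.toDigitsCore b (f + 1) n acc
        = (if n / b = 0 then (n % b).digitChar :: acc
           else Nat.toDigitsCore b f (n / b) ((n % b).digitChar :: acc)) from rfl] at h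
    split_ifs at h with hnb
    · rcases List.mem_cons.mp h with rfl | h'
      · exact Or.inr ⟨n % b, rfl⟩
      · exact Or.inl h'
    · rcases ih (n / b) ((n % b).digitChar :: acc) c h with h' | h'
      · rcases List.mem_cons.mp h' with rfl | h''
        · exact Or.inr ⟨n % b, rfl⟩
        · exact Or.inl h''
      · exact Or.inr h'

lemma pv_digitChar_ne (m : Nat) : Nat.digitChar m ≠ '<' ∧ Nat.digitChar m ≠ '\n' := by
  rcases Nat.lt_or_ge m 16 with h | h
  · interval_cases m <;> exact ⟨by decide, by decide⟩
  · have h0 : Nat.digitChar m = '*' := by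
      unfold Nat.digitChar
      repeat rw [if_neg (by omega)]
    rw [h0]
    exact ⟨by decide, by decide⟩

lemma pv_notin_prefix (i : Nat) (c : Char) (hc : c = '<' ∨ c = '\n') : c ∉ pvPrefix i := by
  intro hmem
  rw [pvPrefix, List.mem_append, List.mem_append] at hmem
  rcases hmem with (h | h) | h
  · rcases hc with rfl | rfl <;> simp at h
  · have hpos : ¬ ((i : Int) + 1 < 0) := by omega
    rw [show PySem.Int.toChars ((i : Int) + 1)
        = Nat.toDigits 10 ((i : Int) + 1).toNat from by
      unfold PySem.Int.toChars
      rw [if_neg hpos]] at h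
    rcases pv_toDigitsCore_mem 10 _ _ _ c h with h' | ⟨m, rfl⟩
    · simp at h'
    · rcases hc with h1 | h1
      · exact (pv_digitChar_ne m).1 h1
      · exact (pv_digitChar_ne m).2 h1
  · rcases hc with rfl | rfl <;> simp at h

lemma pv_suffix_strip {a x r : List Char} {c : Char} (hc : c ∉ a) :
    (c :: r) <:+ (a ++ x) ↔ (c :: r) <:+ x := by
  constructor
  · rintro ⟨p, hp⟩
    by_cases hlen : a.length ≤ p.length
    · have h1 : a <+: p ++ (c :: r) := by rw [hp]; exact List.prefix_append a x
      have h2 : p <+: p ++ (c :: r) := List.prefix_append p (c :: r)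
      obtain ⟨p', rfl⟩ := List.prefix_of_prefix_length_le h1 h2 hlen
      rw [List.append_assoc] at hp
      exact ⟨p', List.append_cancel_left hp⟩
    · exfalso
      have hlen' : p.length < a.length := by omega
      have hidx := congrArg (fun l => l[p.length]?) hp
      simp only at hidx
      rw [List.getElem?_append_right (le_refl p.length)] at hidx
      rw [List.getElem?_append_left hlen'] at hidx
      simp at hidx
      exact hc (List.mem_of_getElem? hidx.symm)
  · rintro ⟨p, hp⟩
    exact ⟨a ++ p, by rw [List.append_assoc, hp]⟩

lemma pv_infix_strip {a x r : List Char} {c : Char} (hc : c ∉ a) :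
    (c :: r) <:+: (a ++ x) ↔ (c :: r) <:+: x := by
  constructor
  · rintro ⟨p, q, hpq⟩
    by_cases hlen : a.length ≤ p.length
    · have h1 : a <+: p ++ (c :: r) ++ q := by rw [hpq]; exact List.prefix_append a x
      have h2 : p <+: p ++ (c :: r) ++ q := by
        rw [List.append_assoc]; exact List.prefix_append p ((c :: r) ++ q)
      obtain ⟨p', rfl⟩ := List.prefix_of_prefix_length_le h1 h2 hlen
      refine ⟨p', q, List.append_cancel_left (as := a) ?_⟩
      simp only [List.append_assoc] at hpq ⊢
      exact hpq
    · exfalso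
      have hlen' : p.length < a.length := by omega
      have hidx := congrArg (fun l => l[p.length]?) hpq
      simp only at hidx
      rw [List.getElem?_append_left (by simp),
        List.getElem?_append_right (le_refl p.length)] at hidx
      rw [List.getElem?_append_left hlen'] at hidx
      simp at hidx
      exact hc (List.mem_of_getElem? hidx.symm)
  · rintro ⟨p, q, hpq⟩
    exact ⟨a ++ p, q, by rw [List.append_assoc, List.append_assoc, ← List.append_assoc p, hpq]⟩

lemma pv_tag_infix_iff (logs : List String) (i : Nat) (hi : i < logs.length)
    (t : List Char) (ht : ∃ r, t = '<' :: r) :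
    (t <:+: ((pvStepsP logs).getD i "").toList ↔ t <:+: (logs.getD i "").toList) := by
  obtain ⟨r, rfl⟩ := ht
  rw [pv_getD_toList logs i hi]
  exact pv_infix_strip (pv_notin_prefix i '<' (Or.inl rfl))

lemma pv_keptD_eq (logs : List String) (i : Nat) (hi : i < logs.length) :
    pvKeptD logs i ↔ pvK (pvStepsP logs) ((i : Int), (pvStepsP logs).getD i "") = true := by
  cases i with
  | zero =>
    constructor
    · intro _
      simp [pvK]
    · intro _
      exact Or.inl rfl
  | succ j =>
    have hj : j < logs.length := by omega
    have hprev : PySem.List.pyGetD (pvStepsP logs) (((j + 1 : Nat) : Int) - 1) ""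
        = (pvStepsP logs).getD j "" := by
      have hc : (((j + 1 : Nat) : Int) - 1) = ((j : Nat) : Int) := by push_cast; ring
      rw [hc, PySem.List.pyGetD_natCast]
    unfold pvKeptD pvK
    simp only [Bool.or_eq_true, Bool.and_eq_true, decide_eq_true_eq, beq_iff_eq,
      PySem.Str.isIn_iff_infix, hprev]
    rw [pv_tag_infix_iff logs (j + 1) hi ("<search>".toList) ⟨"search>".toList, rfl⟩,
      pv_tag_infix_iff logs (j + 1) hi ("</search>".toList) ⟨"/search>".toList, rfl⟩,
      pv_tag_infix_iff logs (j + 1) hi ("<result>".toList) ⟨"result>".toList, rfl⟩,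
      pv_tag_infix_iff logs (j + 1) hi ("</result>".toList) ⟨"/result>".toList, rfl⟩,
      pv_tag_infix_iff logs j hj ("<search>".toList) ⟨"search>".toList, rfl⟩]
    have e0 : (j + 1 = 0) ↔ (((j + 1 : Nat) : Int) = 0) := by omega
    have e1 : (logs.length ≤ j + 1 + 4)
        ↔ (((pvStepsP logs).length : Int) - 4 ≤ ((j + 1 : Nat) : Int)) := by
      rw [pv_steps_length]
      omega
    rw [e0, e1]
    have e2 : (j + 1) - 1 = j := by omega
    rw [e2]
    simp only [or_assoc, and_assoc]

lemma pv_slice_neg7 {α : Type} (l : List α) :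
    PySem.List.slice l (some (-7)) none = l.drop (l.length - 7) := by
  have ha : PySem.List.clampIdx l.length (-7) = l.length - 7 := by
    unfold PySem.List.clampIdx; split_ifs <;> omega
  simp [PySem.List.slice, ha]

lemma pv_drop_eq_iff {l x : List Char} (hx : x.length = 7) :
    l.drop (l.length - 7) = x ↔ x <:+ l := by
  constructor
  · intro h; rw [← h]; exact List.drop_suffix _ _
  · rintro ⟨p, rfl⟩
    have : (p ++ x).length - 7 = p.length := by simp [hx]
    rw [this, List.drop_left]

lemma pv_slice_iff (acc : String) :
    (PySem.Str.slice acc (some (-7)) none = "\n\n...\n\n")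
      ↔ ("\n\n...\n\n" : String).toList <:+ acc.toList := by
  rw [← pv_drop_eq_iff (l := acc.toList) (x := ("\n\n...\n\n" : String).toList) (by rfl)]
  constructor
  · intro h
    have := congrArg String.toList h
    rwa [PySem.Str.toList_slice, PySem.Chars.slice_eq_listSlice, pv_slice_neg7] at this
  · intro h
    apply pv_str_ext
    rw [PySem.Str.toList_slice, PySem.Chars.slice_eq_listSlice, pv_slice_neg7, h]

lemma pv_suffix_cancel {u y d : List Char} : u ++ d <:+ y ++ d ↔ u <:+ y := by
  constructor
  · rintro ⟨p, hp⟩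
    rw [← List.append_assoc] at hp
    exact ⟨p, List.append_cancel_right hp⟩
  · rintro ⟨p, hp⟩
    exact ⟨p, by rw [← List.append_assoc, hp]⟩

lemma pv_suffix_of_append {u a b : List Char} (h : u <:+ a ++ b) (hl : u.length ≤ b.length) :
    u <:+ b := by
  rw [← List.reverse_prefix] at h ⊢
  rw [List.prefix_iff_eq_take] at h ⊢
  rw [List.reverse_append] at h
  rw [h, List.take_append_of_le_length (by simpa using hl)]
  simp

lemma pv_joinNN_concat (xs : List String) (s : String) :
    pvJoinNN (xs ++ [s]) = pvJoinNN xs ++ (s.toList ++ ['\n', '\n']) := by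
  simp [pvJoinNN]

lemma pv_joinNN_ends (pre : List String) (h : pre ≠ []) :
    ∃ J, pvJoinNN pre = J ++ ['\n', '\n'] := by
  rcases List.eq_nil_or_concat pre with rfl | ⟨q, s, rfl⟩
  · exact absurd rfl h
  · exact ⟨pvJoinNN q ++ s.toList, by simp [pvJoinNN]⟩

lemma pv_pyGetD_last {α : Type} (pre : List α) (s d : α) :
    PySem.List.pyGetD (pre ++ [s]) (-1) d = s := by
  simp [PySem.List.pyGetD, PySem.List.pyGet?, PySem.List.pyIdx?]

lemma pv_joinNN_eq_join (h : String) (t : List String) :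
    pvJoinNN (h :: t)
      = PySem.Chars.join ['\n', '\n'] ((h :: t).map String.toList) ++ ['\n', '\n'] := by
  induction t generalizing h with
  | nil => simp [pvJoinNN, PySem.Chars.join_singleton]
  | cons b t ih =>
    simp only [pvJoinNN, List.map_cons, List.flatten_cons] at *
    rw [ih b, PySem.Chars.join_cons_cons]
    simp

lemma pv_strip_nn (x : List Char) :
    PySem.Chars.stripChars (x ++ ['\n', '\n']) ['\n'] = PySem.Chars.stripChars x ['\n'] := by
  show (List.dropWhile _ ((List.dropWhile _ (x ++ ['\n', '\n'])).reverse)).reverse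
     = (List.dropWhile _ ((List.dropWhile _ x).reverse)).reverse
  rw [List.dropWhile_append]
  split_ifs with h1
  · rw [List.isEmpty_iff] at h1
    rw [h1]; rfl
  · rw [List.reverse_append]
    simp [List.dropWhile]

lemma pv_final_eq (tA : String) (h : String) (t : List String)
    (hacc : tA.toList = pvJoinNN (h :: t)) :
    PySem.Str.stripChars tA "\n" = PySem.Str.stripChars (PySem.Str.join "\n\n" (h :: t)) "\n" := by
  show String.ofList _ = String.ofList _
  congr 1
  rw [hacc, pv_joinNN_eq_join, PySem.Str.toList_join]
  show PySem.Chars.stripChars (_ ++ ['\n', '\n']) ['\n'] = _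
  rw [pv_strip_nn]
  rfl

lemma pv_K0 (ps : List String) (x : String) : pvK ps ((0 : Int), x) = true := by
  simp [pvK]

-- state descriptions for the joint forward induction over A's loop and the collapse loop
def pvHeadShape (segs : List String) : Prop :=
  ∃ h t, segs = h :: t ∧ ∃ u, h.toList = ['S', 't', 'e', 'p', ' '] ++ u

def pvPair (ps : List String) (i : Nat) : Prop :=
  pvK ps ((i : Int), ps.getD i "") = true ∧ pvK ps ((i : Int) + 1, ps.getD (i + 1) "") = false ∧
    ("\n\n..." : String).toList <:+ (ps.getD i "").toList

def pvAligned (ps : List String) (K : Nat) (acc : String) (segs : List String) : Prop :=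
  acc.toList = pvJoinNN segs ∧ pvHeadShape segs ∧
    (∃ pre, segs = pre ++ [if pvK ps (((K - 1 : Nat) : Int), ps.getD (K - 1) "") = true
                           then ps.getD (K - 1) "" else "..."]) ∧
    ∀ i, i + 1 < K → ¬ pvPair ps i

def pvDiverged (ps : List String) (K : Nat) (acc : String) (segs : List String) : Prop :=
  (∃ i, i + 1 < ps.length ∧ pvPair ps i) ∧
  ∃ segsA, acc.toList = pvJoinNN segsA ∧ pvHeadShape segsA ∧ pvHeadShape segs ∧
    (pvJoinNN segsA).length < (pvJoinNN segs).length ∧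
    ((∃ preA preB s, segsA = preA ++ [s] ∧ segs = preB ++ [s] ∧
        s = (if pvK ps (((K - 1 : Nat) : Int), ps.getD (K - 1) "") = true
             then ps.getD (K - 1) "" else "...")) ∨
     (pvK ps (((K - 1 : Nat) : Int), ps.getD (K - 1) "") = false ∧
      ∃ preA preB s, segsA = preA ++ [s] ∧ segs = preB ++ ["..."] ∧
        ("\n\n..." : String).toList <:+ s.toList ∧ ∃ u, s.toList = ['S', 't', 'e', 'p', ' '] ++ u))

def pvFoldA (ps : List String) (K : Nat) : String :=
  ((PySem.List.enumerate ps).take K).foldl (pvBodyA ps) ""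

def pvFoldB (ps : List String) (K : Nat) : List String :=
  ((PySem.List.enumerate ps).take K).foldl (pvBodyB' ps) []

lemma pv_take_succ (ps : List String) (K : Nat) (hK : K < ps.length) :
    (PySem.List.enumerate ps).take (K + 1)
      = (PySem.List.enumerate ps).take K ++ [((K : Int), ps[K])] := by
  rw [List.take_add_one]
  congr
  rw [List.getElem?_eq_getElem (by simpa [PySem.List.length_enumerate] using hK)]
  rw [pv_enum_getElem ps K hK]
  rfl

lemma pv_foldA_succ (ps : List String) (K : Nat) (hK : K < ps.length) :
    pvFoldA ps (K + 1) = pvBodyA ps (pvFoldA ps K) ((K : Int), ps[K]) := by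
  unfold pvFoldA
  rw [pv_take_succ ps K hK, List.foldl_append]
  rfl

lemma pv_foldB_succ (ps : List String) (K : Nat) (hK : K < ps.length) :
    pvFoldB ps (K + 1) = pvBodyB' ps (pvFoldB ps K) ((K : Int), ps[K]) := by
  unfold pvFoldB
  rw [pv_take_succ ps K hK, List.foldl_append]
  rfl

-- evaluation of one loop body in each of the possible situations
lemma pv_bodyA_keep (ps : List String) (acc : String) (p : Int × String)
    (hK : pvK ps p = true) : pvBodyA ps acc p = acc ++ p.2 ++ "\n\n" := by
  simp [pvBodyA, hK]

lemma pv_bodyB_keep (ps : List String) (segs : List String) (p : Int × String)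
    (hK : pvK ps p = true) : pvBodyB' ps segs p = segs ++ [p.2] := by
  simp [pvBodyB', pvBodyB, hK]

lemma pv_bodyA_ell (ps : List String) (acc : String) (p : Int × String)
    (hK : pvK ps p = false) (h : ¬ ("\n\n...\n\n" : String).toList <:+ acc.toList) :
    pvBodyA ps acc p = acc ++ "...\n\n" := by
  unfold pvBodyA
  rw [hK]
  rw [if_neg (by simp)]
  rw [if_pos]
  intro heq
  exact h ((pv_slice_iff acc).mp heq)

lemma pv_bodyA_skip (ps : List String) (acc : String) (p : Int × String)
    (hK : pvK ps p = false) (h : ("\n\n...\n\n" : String).toList <:+ acc.toList) :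
    pvBodyA ps acc p = acc := by
  unfold pvBodyA
  rw [hK]
  rw [if_neg (by simp)]
  rw [if_neg (by simp [(pv_slice_iff acc).mpr h])]

lemma pv_bodyB_ell (ps : List String) (segs pre : List String) (s : String) (p : Int × String)
    (hK : pvK ps p = false) (hpre : segs = pre ++ [s]) (hs : s ≠ "...") :
    pvBodyB' ps segs p = segs ++ ["..."] := by
  unfold pvBodyB' pvBodyB
  rw [hK]
  rw [if_neg (by simp)]
  rw [hpre, pv_pyGetD_last]
  rw [decide_eq_true hs]
  simp

lemma pv_bodyB_skip (ps : List String) (segs pre : List String) (p : Int × String)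
    (hK : pvK ps p = false) (hpre : segs = pre ++ ["..."]) :
    pvBodyB' ps segs p = segs := by
  unfold pvBodyB' pvBodyB
  rw [hK]
  rw [if_neg (by simp)]
  rw [hpre, pv_pyGetD_last]
  simp

-- whether the accumulated string ends with the ellipsis paragraph, read off the segment list
lemma pv_suf_dots (acc : String) (segs pre : List String)
    (hacc : acc.toList = pvJoinNN segs) (hpre : segs = pre ++ ["..."]) (hne : pre ≠ []) :
    ("\n\n...\n\n" : String).toList <:+ acc.toList := by
  rw [hacc, hpre, pv_joinNN_concat]
  obtain ⟨J, hJ⟩ := pv_joinNN_ends pre hne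
  rw [hJ, List.append_assoc]
  exact ⟨J, rfl⟩

lemma pv_suf_quirk (acc : String) (segs pre : List String) (s : String)
    (hacc : acc.toList = pvJoinNN segs) (hpre : segs = pre ++ [s])
    (hq : ("\n\n..." : String).toList <:+ s.toList) :
    ("\n\n...\n\n" : String).toList <:+ acc.toList := by
  obtain ⟨w, hw⟩ := hq
  rw [hacc, hpre, pv_joinNN_concat, ← hw]
  refine ⟨pvJoinNN pre ++ w, ?_⟩
  have hx : ("\n\n...\n\n" : String).toList = ("\n\n..." : String).toList ++ ['\n', '\n'] := rfl
  rw [hx]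
  simp [List.append_assoc]

lemma pv_nsuf (acc : String) (segs pre : List String) (s : String)
    (hacc : acc.toList = pvJoinNN segs) (hpre : segs = pre ++ [s])
    (hsh : ∃ u, s.toList = ['S', 't', 'e', 'p', ' '] ++ u)
    (hnq : ¬ ("\n\n..." : String).toList <:+ s.toList) :
    ¬ ("\n\n...\n\n" : String).toList <:+ acc.toList := by
  rw [hacc, hpre, pv_joinNN_concat]
  intro hsuf
  have hsplit : ("\n\n...\n\n" : String).toList
      = ("\n\n..." : String).toList ++ ['\n', '\n'] := rfl
  rw [hsplit, ← List.append_assoc] at hsuf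
  have h5 := pv_suffix_cancel.mp hsuf
  obtain ⟨u, hu⟩ := hsh
  have hlen5 : ("\n\n..." : String).toList.length ≤ s.toList.length := by
    rw [hu]
    simp
  exact hnq (pv_suffix_of_append h5 hlen5)

lemma pv_shape_ne_dots (s : String) (h : ∃ u, s.toList = ['S', 't', 'e', 'p', ' '] ++ u) :
    s ≠ "..." := by
  intro he
  obtain ⟨u, hu⟩ := h
  rw [he] at hu
  simp at hu

lemma pv_head_pre_ne (segs pre : List String) (hh : pvHeadShape segs)
    (hpre : segs = pre ++ ["..."]) : pre ≠ [] := by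
  intro he
  rw [he] at hpre
  obtain ⟨h, t, hseg, u, hu⟩ := hh
  rw [hseg] at hpre
  simp at hpre
  rw [hpre.1] at hu
  simp at hu

lemma pv_joinNN_concat_len (xs : List String) (s : String) :
    (pvJoinNN (xs ++ [s])).length = (pvJoinNN xs).length + s.toList.length + 2 := by
  rw [pv_joinNN_concat]
  simp
  omega

-- the joint forward invariant: after K loop iterations A's loop and the collapse loop are either
-- still aligned (and no kept-quirky-then-dropped pair has been passed) or have diverged for good
lemma pv_mega (ps : List String)
    (hshape : ∀ i, i < ps.length → ∃ u, (ps.getD i "").toList = ['S', 't', 'e', 'p', ' '] ++ u) :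
    ∀ K, 1 ≤ K → K ≤ ps.length →
      pvAligned ps K (pvFoldA ps K) (pvFoldB ps K)
        ∨ pvDiverged ps K (pvFoldA ps K) (pvFoldB ps K) := by
  intro K
  induction K with
  | zero => intro h; omega
  | succ K ih =>
    intro _ hKn
    by_cases hK0 : K = 0
    · subst hK0
      left
      have h0 : 0 < ps.length := by omega
      have hgd : ps.getD 0 "" = ps[0] := List.getD_eq_getElem _ _ h0
      have hfa := pv_foldA_succ ps 0 h0
      have hfb := pv_foldB_succ ps 0 h0
      have hk0 : pvK ps (((0 : Nat) : Int), ps[0]) = true := by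
        rw [Nat.cast_zero]; exact pv_K0 ps _
      rw [hfa, hfb, pv_bodyA_keep _ _ _ hk0, pv_bodyB_keep _ _ _ hk0]
      have hFB0 : pvFoldB ps 0 = [] := rfl
      have hFA0 : pvFoldA ps 0 = "" := rfl
      rw [hFA0, hFB0]
      refine ⟨?_, ?_, ?_, ?_⟩
      · simp [pvJoinNN, String.toList_append]
      · exact ⟨ps[0], [], rfl, by rw [← hgd]; exact hshape 0 h0⟩
      · refine ⟨[], ?_⟩
        simp only [Nat.sub_self]
        rw [hgd, Nat.cast_zero, pv_K0]
        simp
      · intro i hi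
        omega
    · have hK1 : 1 ≤ K := by omega
      have hKlt : K < ps.length := by omega
      specialize ih hK1 (by omega)
      have hgdK : ps.getD K "" = ps[K] := List.getD_eq_getElem _ _ hKlt
      have hfa := pv_foldA_succ ps K hKlt
      have hfb := pv_foldB_succ ps K hKlt
      have e1 : (K + 1) - 1 = K := by omega
      by_cases hK : pvK ps ((K : Int), ps[K]) = true
      · -- index K is kept: both loops append the same step
        rw [hfa, hfb, pv_bodyA_keep _ _ _ hK, pv_bodyB_keep _ _ _ hK]
        dsimp only
        rcases ih with ⟨hacc, hh, hlast, hnp⟩ | ⟨hpair, segsA, hacc, hhA, hhB, hlen, hrel⟩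
        · left
          refine ⟨?_, ?_, ?_, ?_⟩
          · rw [String.toList_append, String.toList_append, hacc, pv_joinNN_concat]
            have hnn : ("\n\n" : String).toList = ['\n', '\n'] := rfl
            rw [hnn, List.append_assoc]
          · obtain ⟨h, t, hseg, hu⟩ := hh
            exact ⟨h, t ++ [ps[K]], by rw [hseg]; simp, hu⟩
          · refine ⟨pvFoldB ps K, ?_⟩
            simp only [e1]
            rw [hgdK, hK]
            simp
          · intro i hi hp
            rcases Nat.lt_or_ge (i + 1) K with hlt | hge
            · exact hnp i hlt hp
            · have hieq : i + 1 = K := by omega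
              have hcast : (i : Int) + 1 = (K : Int) := by omega
              have := hp.2.1
              rw [hcast, hieq, hgdK, hK] at this
              exact Bool.false_ne_true this.symm
        · right
          refine ⟨hpair, segsA ++ [ps[K]], ?_, ?_, ?_, ?_, ?_⟩
          · rw [String.toList_append, String.toList_append, hacc, pv_joinNN_concat]
            have hnn : ("\n\n" : String).toList = ['\n', '\n'] := rfl
            rw [hnn, List.append_assoc]
          · obtain ⟨h, t, hseg, hu⟩ := hhA
            exact ⟨h, t ++ [ps[K]], by rw [hseg]; simp, hu⟩
          · obtain ⟨h, t, hseg, hu⟩ := hhB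
            exact ⟨h, t ++ [ps[K]], by rw [hseg]; simp, hu⟩
          · rw [pv_joinNN_concat_len, pv_joinNN_concat_len]
            omega
          · left
            refine ⟨segsA, pvFoldB ps K, ps[K], rfl, rfl, ?_⟩
            simp only [e1]
            rw [hgdK, hK]
            simp
      · rw [Bool.not_eq_true] at hK
        rcases ih with ⟨hacc, hh, hlast, hnp⟩ | ⟨hpair, segsA, hacc, hhA, hhB, hlen, hrel⟩
        · -- still aligned, index K dropped
          obtain ⟨pre, hpre⟩ := hlast
          by_cases hKp : pvK ps (((K - 1 : Nat) : Int), ps.getD (K - 1) "") = true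
          · rw [if_pos hKp] at hpre
            have hsK1 := hshape (K - 1) (by omega)
            by_cases hq : ("\n\n..." : String).toList <:+ (ps.getD (K - 1) "").toList
            · -- the pair (K-1, K) is quirky: A is fooled and skips, B emits "..." — diverge
              right
              have hsuf := pv_suf_quirk _ _ _ _ hacc hpre hq
              rw [hfa, hfb, pv_bodyA_skip _ _ _ hK hsuf,
                pv_bodyB_ell _ _ _ _ _ hK hpre (pv_shape_ne_dots _ hsK1)]
              have hkk1 : (K - 1) + 1 = K := by omega
              have hcast : ((K - 1 : Nat) : Int) + 1 = (K : Int) := by omega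
              refine ⟨⟨K - 1, by omega, hKp, ?_, hq⟩,
                pvFoldB ps K, hacc, hh, ?_, ?_, Or.inr ⟨?_, pre, pvFoldB ps K,
                  ps.getD (K - 1) "", hpre, rfl, hq, hsK1⟩⟩
              · rw [hcast, hkk1, hgdK]
                exact hK
              · obtain ⟨h, t, hseg, hu⟩ := hh
                exact ⟨h, t ++ ["..."], by rw [hseg]; simp, hu⟩
              · rw [pv_joinNN_concat_len]
                omega
              · simp only [e1]
                rw [hgdK]
                exact hK
            · -- no quirk: both loops emit "..."
              left
              have hnsuf := pv_nsuf _ _ _ _ hacc hpre hsK1 hq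
              rw [hfa, hfb, pv_bodyA_ell _ _ _ hK hnsuf,
                pv_bodyB_ell _ _ _ _ _ hK hpre (pv_shape_ne_dots _ hsK1)]
              refine ⟨?_, ?_, ?_, ?_⟩
              · rw [String.toList_append, hacc, pv_joinNN_concat]
                have hd : ("...\n\n" : String).toList = ("..." : String).toList ++ ['\n', '\n'] := rfl
                rw [hd]
              · obtain ⟨h, t, hseg, hu⟩ := hh
                exact ⟨h, t ++ ["..."], by rw [hseg]; simp, hu⟩
              · refine ⟨pvFoldB ps K, ?_⟩
                simp only [e1]
                rw [hgdK, hK]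
                simp
              · intro i hi hp
                rcases Nat.lt_or_ge (i + 1) K with hlt | hge
                · exact hnp i hlt hp
                · have hieq : i + 1 = K := by omega
                  have hieq2 : i = K - 1 := by omega
                  rw [hieq2] at hp
                  exact hq hp.2.2
          · rw [Bool.not_eq_true] at hKp
            rw [hKp] at hpre
            rw [if_neg (by simp)] at hpre
            have hprene := pv_head_pre_ne _ _ hh hpre
            have hsuf := pv_suf_dots _ _ _ hacc hpre hprene
            left
            rw [hfa, hfb, pv_bodyA_skip _ _ _ hK hsuf, pv_bodyB_skip _ _ _ _ hK hpre]
            refine ⟨hacc, hh, ?_, ?_⟩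
            · refine ⟨pre, ?_⟩
              simp only [e1]
              rw [hgdK, hK]
              simpa using hpre
            · intro i hi hp
              rcases Nat.lt_or_ge (i + 1) K with hlt | hge
              · exact hnp i hlt hp
              · have hieq2 : i = K - 1 := by omega
                rw [hieq2] at hp
                rw [hp.1] at hKp
                exact Bool.false_ne_true hKp.symm
        · -- already diverged, index K dropped
          rcases hrel with ⟨preA, preB, s, hpA, hpB, hs⟩ | ⟨hKpf, preA, preB, s, hpA, hpB, hq, hsh⟩
          · by_cases hKp : pvK ps (((K - 1 : Nat) : Int), ps.getD (K - 1) "") = true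
            · rw [if_pos hKp] at hs
              subst hs
              have hsK1 := hshape (K - 1) (by omega)
              by_cases hq : ("\n\n..." : String).toList <:+ (ps.getD (K - 1) "").toList
              · -- quirky: A skips, B emits "..."
                right
                have hsuf := pv_suf_quirk _ _ _ _ hacc hpA hq
                rw [hfa, hfb, pv_bodyA_skip _ _ _ hK hsuf,
                  pv_bodyB_ell _ _ _ _ _ hK hpB (pv_shape_ne_dots _ hsK1)]
                refine ⟨hpair, segsA, hacc, hhA, ?_, ?_, Or.inr ⟨?_, preA, pvFoldB ps K,
                  ps.getD (K - 1) "", hpA, rfl, hq, hsK1⟩⟩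
                · obtain ⟨h, t, hseg, hu⟩ := hhB
                  exact ⟨h, t ++ ["..."], by rw [hseg]; simp, hu⟩
                · rw [pv_joinNN_concat_len]
                  omega
                · simp only [e1]
                  rw [hgdK]
                  exact hK
              · -- both emit "..."
                right
                have hnsuf := pv_nsuf _ _ _ _ hacc hpA hsK1 hq
                rw [hfa, hfb, pv_bodyA_ell _ _ _ hK hnsuf,
                  pv_bodyB_ell _ _ _ _ _ hK hpB (pv_shape_ne_dots _ hsK1)]
                refine ⟨hpair, segsA ++ ["..."], ?_, ?_, ?_, ?_, Or.inl
                  ⟨segsA, pvFoldB ps K, "...", rfl, rfl, ?_⟩⟩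
                · rw [String.toList_append, hacc, pv_joinNN_concat]
                  have hd : ("...\n\n" : String).toList = ("..." : String).toList ++ ['\n', '\n'] := rfl
                  rw [hd]
                · obtain ⟨h, t, hseg, hu⟩ := hhA
                  exact ⟨h, t ++ ["..."], by rw [hseg]; simp, hu⟩
                · obtain ⟨h, t, hseg, hu⟩ := hhB
                  exact ⟨h, t ++ ["..."], by rw [hseg]; simp, hu⟩
                · rw [pv_joinNN_concat_len, pv_joinNN_concat_len]
                  omega
                · simp only [e1]
                  rw [hgdK, hK]
                  simp
            · rw [Bool.not_eq_true] at hKp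
              rw [hKp] at hs
              rw [if_neg (by simp)] at hs
              subst hs
              have hsuf := pv_suf_dots _ _ _ hacc hpA (pv_head_pre_ne _ _ hhA hpA)
              rw [hfa, hfb, pv_bodyA_skip _ _ _ hK hsuf, pv_bodyB_skip _ _ _ _ hK hpB]
              right
              refine ⟨hpair, segsA, hacc, hhA, hhB, hlen, Or.inl ⟨preA, preB, "...", hpA, hpB, ?_⟩⟩
              simp only [e1]
              rw [hgdK, hK]
              simp
          · -- B's last is "...", A's last is a quirky kept step: both skip
            have hsuf := pv_suf_quirk _ _ _ _ hacc hpA hq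
            rw [hfa, hfb, pv_bodyA_skip _ _ _ hK hsuf, pv_bodyB_skip _ _ _ _ hK hpB]
            right
            refine ⟨hpair, segsA, hacc, hhA, hhB, hlen, Or.inr ⟨?_, preA, preB, s, hpA, hpB, hq, hsh⟩⟩
            simp only [e1]
            rw [hgdK]
            exact hK

-- ===== bridging port B's kept-index/gap computation to the collapse fold =====

lemma pv_keptI_natCast (ps : List String) (k : Nat) :
    pvKeptI ps ((k : Nat) : Int) = pvKb ps k := by
  simp only [pvKeptI, pvKb, pvK, PySem.List.pyGetD_natCast]

lemma pv_ks_natCast (ps : List String) :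
    (PySem.List.pyRange 0 (ps.length : Int) 1).filter (pvKeptI ps)
      = (pvKs ps ps.length).map (fun (k : Nat) => (k : Int)) := by
  rw [PySem.List.pyRange_zero_natCast, List.filter_map]
  unfold pvKs
  exact congrArg (List.map _) (List.filter_congr (fun k _ => pv_keptI_natCast ps k))

lemma pv_bodyI_cast (ps : List String) (acc : List String) (a b : Nat) :
    pvBodyI ps acc ((a : Int), (b : Int)) = pvBodyN ps acc (a, b) := by
  have hc : (1 < (b : Int) - (a : Int)) ↔ (a + 1 < b) := by omega
  simp only [pvBodyI, pvBodyN, PySem.List.pyGetD_natCast, hc]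

lemma pv_fold_cast (ps : List String) (ksN : List Nat) :
    (((ksN.map (fun (k : Nat) => (k : Int))).zip (ksN.map (fun (k : Nat) => (k : Int))).tail).foldl
        (pvBodyI ps) [])
      = pvPartsF ps ksN := by
  rw [← List.map_tail, List.zip_map, List.foldl_map]
  unfold pvPartsF
  have hfun : (fun (acc : List String) (p : Nat × Nat) =>
      pvBodyI ps acc (Prod.map (fun (k : Nat) => (k : Int)) (fun (k : Nat) => (k : Int)) p)) = pvBodyN ps := by
    funext acc p
    cases p with
    | mk a b => exact pv_bodyI_cast ps acc a b
  rw [hfun]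

lemma pv_zip_tail_snoc {α : Type} :
    ∀ (l : List α) (x : α) (h : l ≠ []),
      ((l ++ [x]).zip (l ++ [x]).tail) = (l.zip l.tail) ++ [(l.getLast h, x)] := by
  intro l
  induction l with
  | nil => intro x h; exact absurd rfl h
  | cons a t ih =>
    intro x h
    cases t with
    | nil => simp
    | cons b t' =>
      have hne : (b :: t') ≠ [] := by simp
      have hstep := ih (x := x) hne
      show ((a, b) :: ((b :: t' ++ [x]).zip (t' ++ [x]))) = _
      have h2 : (b :: t' ++ [x]).zip (t' ++ [x]) = ((b :: t') ++ [x]).zip ((b :: t') ++ [x]).tail := rfl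
      rw [h2, hstep]
      simp [List.getLast_cons hne]

lemma pv_partsF_snoc (ps : List String) (pre : List Nat) (m x : Nat) :
    pvPartsF ps ((pre ++ [m]) ++ [x])
      = pvPartsF ps (pre ++ [m]) ++ [ps.getD m ""] ++ (if m + 1 < x then ["..."] else []) := by
  unfold pvPartsF
  rw [pv_zip_tail_snoc (pre ++ [m]) x (by simp), List.foldl_append, List.getLast_concat]
  simp only [List.foldl_cons, List.foldl_nil, pvBodyN]
  split_ifs <;> simp

-- the collapse fold computed from the kept-index list: after K iterations the segments are the
-- gap-collapsed parts of the kept indices below K plus the last kept step, and a trailing "..."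
-- exactly when the last processed index was dropped
lemma pv_parts_inv (ps : List String)
    (hshape : ∀ i, i < ps.length → ∃ u, (ps.getD i "").toList = ['S', 't', 'e', 'p', ' '] ++ u) :
    ∀ K, 1 ≤ K → K ≤ ps.length →
      ∃ pre m, pvKs ps K = pre ++ [m] ∧ m < K ∧
        pvFoldB ps K = pvPartsF ps (pvKs ps K) ++ [ps.getD m ""]
          ++ (if m = K - 1 then [] else ["..."]) := by
  intro K
  induction K with
  | zero => intro h; omega
  | succ K ih =>
    intro _ hKn
    have hKlt : K < ps.length := by omega
    have hgdK : ps.getD K "" = ps[K] := List.getD_eq_getElem _ _ hKlt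
    have hksS : pvKs ps (K + 1) = pvKs ps K ++ (if pvKb ps K then [K] else []) := by
      unfold pvKs
      rw [List.range_succ, List.filter_append]
      congr 1
      cases h : pvKb ps K <;> simp [List.filter, h]
    by_cases hK0 : K = 0
    · subst hK0
      have hkb0 : pvKb ps 0 = true := by
        unfold pvKb
        rw [Nat.cast_zero]
        exact pv_K0 ps _
      have hks1 : pvKs ps 1 = [0] := by
        rw [hksS, hkb0]
        rfl
      refine ⟨[], 0, by simpa using hks1, by omega, ?_⟩
      have hfb := pv_foldB_succ ps 0 hKlt
      have hk0 : pvK ps (((0 : Nat) : Int), ps[0]) = true := by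
        rw [Nat.cast_zero]; exact pv_K0 ps _
      rw [hfb, pv_bodyB_keep _ _ _ hk0]
      have hFB0 : pvFoldB ps 0 = [] := rfl
      rw [hFB0, hks1, hgdK]
      simp [pvPartsF]
    · have hK1 : 1 ≤ K := by omega
      obtain ⟨pre, m, hks, hmK, hfold⟩ := ih hK1 (by omega)
      have hfb := pv_foldB_succ ps K hKlt
      have e1 : (K + 1) - 1 = K := by omega
      by_cases hkbK : pvKb ps K = true
      · -- index K kept: append steps[K]; the gap marker m+1<K matches the trailing "..."
        have hkK : pvK ps ((K : Int), ps[K]) = true := by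
          unfold pvKb at hkbK
          rwa [hgdK] at hkbK
        refine ⟨pre ++ [m], K, by rw [hksS, hkbK, hks, if_pos rfl], by omega, ?_⟩
        rw [hfb, pv_bodyB_keep _ _ _ hkK, hfold]
        rw [hksS, hkbK, if_pos rfl, hks, pv_partsF_snoc]
        simp only [e1]
        by_cases hm : m = K - 1
        · have hng : ¬ (m + 1 < K) := by omega
          rw [if_pos hm, if_neg hng]
          simp [List.getElem?_eq_getElem hKlt]
        · have hg : m + 1 < K := by omega
          rw [if_neg hm, if_pos hg]
          simp [List.getElem?_eq_getElem hKlt]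
      · -- index K dropped: the kept-index list is unchanged
        rw [Bool.not_eq_true] at hkbK
        have hkK : pvK ps ((K : Int), ps[K]) = false := by
          unfold pvKb at hkbK
          rwa [hgdK] at hkbK
        have hksU : pvKs ps (K + 1) = pre ++ [m] := by
          rw [hksS, hkbK, hks]
          simp
        refine ⟨pre, m, hksU, by omega, ?_⟩
        have hshm := hshape m (by omega)
        by_cases hm : m = K - 1
        · -- last segment is a step text: the collapse emits one "..."
          rw [if_pos hm] at hfold
          rw [List.append_nil] at hfold
          have hell := pv_bodyB_ell ps (pvFoldB ps K) (pvPartsF ps (pvKs ps K)) (ps.getD m "")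
            ((K : Int), ps[K]) hkK hfold (pv_shape_ne_dots _ hshm)
          rw [hfb, hell, hfold]
          have hmne : ¬ (m = (K + 1) - 1) := by omega
          rw [if_neg hmne, hksU, hks]
        · -- last segment is already "...": the collapse skips
          rw [if_neg hm] at hfold
          have hskip := pv_bodyB_skip ps (pvFoldB ps K)
            (pvPartsF ps (pvKs ps K) ++ [ps.getD m ""]) ((K : Int), ps[K]) hkK (by rw [hfold])
          rw [hfb, hskip, hfold]
          have hmne : ¬ (m = (K + 1) - 1) := by omega
          rw [if_neg hmne, hksU, hks]

-- port B equals the collapse fold of the intermediate segment loop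
lemma pv_alt_eq (logs : List String) :
    get_truncated_prev_reasoning_alt logs =
      if (pvStepsP logs).length ≤ 5 then
        PySem.Str.stripChars (PySem.Str.join "\n\n" (pvStepsP logs)) "\n"
      else
        PySem.Str.stripChars (PySem.Str.join "\n\n"
          ((PySem.List.enumerate (pvStepsP logs)).foldl (pvBodyB' (pvStepsP logs)) [])) "\n" := by
  rw [pv_alt_unfold]
  by_cases h5 : (pvStepsP logs).length ≤ 5
  · rw [if_pos h5, if_pos h5]
  · rw [if_neg h5, if_neg h5]
    have hshape : ∀ i, i < (pvStepsP logs).length →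
        ∃ u, ((pvStepsP logs).getD i "").toList = ['S', 't', 'e', 'p', ' '] ++ u := by
      intro i hi
      exact pv_shape logs i (by
        have := pv_steps_length logs
        omega)
    obtain ⟨pre, m, hks, hmK, hfold⟩ :=
      pv_parts_inv (pvStepsP logs) hshape (pvStepsP logs).length (by omega) le_rfl
    have hkb_last : pvKb (pvStepsP logs) ((pvStepsP logs).length - 1) = true := by
      unfold pvKb pvK
      have hdec : decide (((pvStepsP logs).length : Int) - 4
          ≤ (((pvStepsP logs).length - 1 : Nat) : Int)) = true := by
        rw [decide_eq_true_eq]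
        omega
      rw [hdec]
      simp
    have hmem : ((pvStepsP logs).length - 1) ∈ pvKs (pvStepsP logs) (pvStepsP logs).length := by
      unfold pvKs
      rw [List.mem_filter]
      exact ⟨List.mem_range.mpr (by omega), hkb_last⟩
    have hm_eq : m = (pvStepsP logs).length - 1 := by
      rw [hks] at hmem
      rcases List.mem_append.mp hmem with hin | hin
      · exfalso
        have hp : (pvKs (pvStepsP logs) (pvStepsP logs).length).Pairwise (· < ·) :=
          List.pairwise_lt_range.filter _
        rw [hks] at hp
        have hlt := (List.pairwise_append.mp hp).2.2 _ hin m (by simp)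
        omega
      · have := List.mem_singleton.mp hin
        omega
    have henum : (PySem.List.enumerate (pvStepsP logs)).foldl (pvBodyB' (pvStepsP logs)) []
        = pvFoldB (pvStepsP logs) (pvStepsP logs).length := by
      unfold pvFoldB
      rw [show (pvStepsP logs).length = (PySem.List.enumerate (pvStepsP logs)).length from
        (PySem.List.length_enumerate _ _).symm]
      rw [List.take_length]
    rw [henum, hfold, hm_eq]
    rw [if_pos rfl, List.append_nil]
    rw [pv_ks_natCast, pv_fold_cast]
    congr 2
    rw [hks, hm_eq, List.map_append]
    rw [show List.map (fun (k : Nat) => (k : Int)) [(pvStepsP logs).length - 1]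
        = [(((pvStepsP logs).length - 1 : Nat) : Int)] from rfl]
    rw [pv_pyGetD_last, PySem.List.pyGetD_natCast]

-- a kept-quirky-then-dropped pair of the prefixed steps is exactly the change region D_
lemma pv_pair_D (logs : List String) (i : Nat) (hi : i + 1 < (pvStepsP logs).length)
    (hp : pvPair (pvStepsP logs) i) : D_get_truncated_prev_reasoning logs := by
  have hlen : logs.length = (pvStepsP logs).length := (pv_steps_length logs).symm
  obtain ⟨hk1, hk2, hq⟩ := hp
  refine ⟨i, by omega, ?_, ?_, ?_⟩
  · exact (pv_keptD_eq logs i (by omega)).mpr hk1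
  · intro hcon
    have hth := (pv_keptD_eq logs (i + 1) (by omega)).mp hcon
    have hc : ((i + 1 : Nat) : Int) = (i : Int) + 1 := by push_cast; ring
    rw [hc] at hth
    rw [hk2] at hth
    exact Bool.false_ne_true hth
  · rw [PySem.Str.endswith_eq, PySem.Chars.endswith_iff]
    rw [pv_getD_toList logs i (by omega)] at hq
    have hs : ("\n\n..." : String).toList = '\n' :: ("\n..." : String).toList := rfl
    rw [hs] at hq ⊢
    exact (pv_suffix_strip (pv_notin_prefix i '\n' (Or.inr rfl))).mp hq

lemma pv_D_pair (logs : List String) (hD : D_get_truncated_prev_reasoning logs) :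
    ∃ i, i + 1 < (pvStepsP logs).length ∧ pvPair (pvStepsP logs) i := by
  have hlen : logs.length = (pvStepsP logs).length := (pv_steps_length logs).symm
  obtain ⟨i, hilt, hk1, hk2, hq⟩ := hD
  have hi1 : i + 1 < logs.length := by
    by_contra hcon
    exact hk2 (Or.inr (Or.inl (by omega)))
  refine ⟨i, by omega, (pv_keptD_eq logs i (by omega)).mp hk1, ?_, ?_⟩
  · have hc : ((i + 1 : Nat) : Int) = (i : Int) + 1 := by push_cast; ring
    rw [← hc]
    cases hval : pvK (pvStepsP logs) (((i + 1 : Nat) : Int), (pvStepsP logs).getD (i + 1) "") with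
    | false => rfl
    | true => exact absurd ((pv_keptD_eq logs (i + 1) (by omega)).mpr hval) hk2
  · rw [PySem.Str.endswith_eq, PySem.Chars.endswith_iff] at hq
    rw [pv_getD_toList logs i (by omega)]
    have hs : ("\n\n..." : String).toList = '\n' :: ("\n..." : String).toList := rfl
    rw [hs] at hq ⊢
    exact (pv_suffix_strip (pv_notin_prefix i '\n' (Or.inr rfl))).mpr hq

-- a strict length gap between the two segment lists survives the final join-and-strip
lemma pv_out_ne (tA : String) (segsA segsB : List String) (s : String)
    (hacc : tA.toList = pvJoinNN segsA)
    (hA : ∃ pre, segsA = pre ++ [s]) (hB : ∃ pre, segsB = pre ++ [s])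
    (hhA : pvHeadShape segsA) (hhB : pvHeadShape segsB)
    (hsh : ∃ u, s.toList = ['S', 't', 'e', 'p', ' '] ++ u)
    (hlen : (pvJoinNN segsA).length < (pvJoinNN segsB).length) :
    PySem.Str.stripChars tA "\n" ≠ PySem.Str.stripChars (PySem.Str.join "\n\n" segsB) "\n" := by
  obtain ⟨hb, tb, hsegB, -⟩ := id hhB
  intro he
  have helist := congrArg String.toList he
  rw [PySem.Str.toList_stripChars, PySem.Str.toList_stripChars, PySem.Str.toList_join] at helist
  rw [hacc] at helist
  have hBjoin : PySem.Chars.stripChars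
      (PySem.Chars.join ("\n\n" : String).toList (segsB.map String.toList)) ("\n" : String).toList
      = PySem.Chars.stripChars (pvJoinNN segsB) ("\n" : String).toList := by
    rw [hsegB, pv_joinNN_eq_join]
    have hnn : ("\n\n" : String).toList = ['\n', '\n'] := rfl
    have h1 : ("\n" : String).toList = ['\n'] := rfl
    rw [hnn, h1, pv_strip_nn]
  rw [hBjoin] at helist
  -- both stripped strings have computable length: leading strip is a no-op, trailing strip is equal
  have hlenEq := congrArg List.length helist
  have key : ∀ (segs : List String) (pre : List String), pvHeadShape segs → segs = pre ++ [s] →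
      (PySem.Chars.stripChars (pvJoinNN segs) ("\n" : String).toList).length
        = (List.dropWhile (fun c => List.contains ['\n'] c)
            (s.toList ++ ['\n', '\n']).reverse).length + (pvJoinNN pre).length := by
    intro segs pre hh hpre
    obtain ⟨h, t, hseg, u, hu⟩ := hh
    have h1 : ("\n" : String).toList = ['\n'] := rfl
    rw [h1]
    show (List.dropWhile _ ((List.dropWhile _ (pvJoinNN segs)).reverse)).reverse.length = _
    have hlead : List.dropWhile (fun c => List.contains ['\n'] c) (pvJoinNN segs)
        = pvJoinNN segs := by
      have hjs : pvJoinNN segs = ['S', 't', 'e', 'p', ' '] ++ (u ++ (['\n', '\n'] ++ pvJoinNN t)) := by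
        rw [hseg]
        simp [pvJoinNN, hu]
      rw [hjs]
      rfl
    rw [hlead, hpre, pv_joinNN_concat, List.reverse_append]
    rw [List.dropWhile_append]
    have hne : (List.dropWhile (fun c => List.contains ['\n'] c)
        (s.toList ++ ['\n', '\n']).reverse).isEmpty = false := by
      cases hdw : List.dropWhile (fun c => List.contains ['\n'] c)
          (s.toList ++ ['\n', '\n']).reverse with
      | nil =>
        exfalso
        rw [List.dropWhile_eq_nil_iff] at hdw
        obtain ⟨u2, hu2⟩ := hsh
        have hmem : 'S' ∈ (s.toList ++ ['\n', '\n']).reverse := by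
          rw [List.mem_reverse, List.mem_append]
          left
          rw [hu2]
          simp
        have hcon := hdw _ hmem
        simp at hcon
      | cons a l => rfl
    rw [hne]
    simp
    omega
  obtain ⟨preA, hpA⟩ := hA
  obtain ⟨preB, hpB⟩ := hB
  have hkA := key segsA preA hhA hpA
  have hkB := key segsB preB hhB hpB
  rw [hkA, hkB] at hlenEq
  have hlA : (pvJoinNN segsA).length = (pvJoinNN preA).length + s.toList.length + 2 := by
    rw [hpA, pv_joinNN_concat_len]
  have hlB : (pvJoinNN segsB).length = (pvJoinNN preB).length + s.toList.length + 2 := by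
    rw [hpB, pv_joinNN_concat_len]
  omega

-- ===== VERDICT (by name: the statement is the Claim_ definition above) =====
theorem get_truncated_prev_reasoning_spec : Claim_unchanged_get_truncated_prev_reasoning := by
  intro logs _hdom _hpre
  unfold Spec_get_truncated_prev_reasoning
  intro hD
  rw [portA_eq, pv_alt_eq]
  by_cases hle : (pvStepsP logs).length ≤ 5
  · rw [if_pos hle, if_pos hle]
  · rw [if_neg hle, if_neg hle]
    have htake : (PySem.List.enumerate (pvStepsP logs)).take (pvStepsP logs).length
        = PySem.List.enumerate (pvStepsP logs) := by
      rw [show (pvStepsP logs).length = (PySem.List.enumerate (pvStepsP logs)).length from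
        (PySem.List.length_enumerate _ _).symm]
      exact List.take_length ..
    have hshape : ∀ i, i < (pvStepsP logs).length →
        ∃ u, ((pvStepsP logs).getD i "").toList = ['S', 't', 'e', 'p', ' '] ++ u := by
      intro i hi
      exact pv_shape logs i (by
        have := pv_steps_length logs
        omega)
    have hmega := pv_mega (pvStepsP logs) hshape (pvStepsP logs).length (by omega) (le_refl _)
    rw [pvFoldA, pvFoldB, htake] at hmega
    rcases hmega with ⟨hacc, ⟨h, t, hseg, _⟩, _, _⟩ | ⟨⟨i, hi1, hp⟩, _⟩
    · rw [hseg] at hacc ⊢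
      exact pv_final_eq _ h t hacc
    · exact absurd (pv_pair_D logs i hi1 hp) hD

theorem get_truncated_prev_reasoning_tight : Claim_exact_get_truncated_prev_reasoning := by
  intro logs _hdom _hpre hD
  rw [portA_eq, pv_alt_eq]
  have hlen : logs.length = (pvStepsP logs).length := (pv_steps_length logs).symm
  obtain ⟨i0, hi0, hp0⟩ := pv_D_pair logs hD
  have hn5 : 5 < (pvStepsP logs).length := by
    by_contra hcon
    have hk : pvK (pvStepsP logs) ((i0 : Int) + 1, (pvStepsP logs).getD (i0 + 1) "") = true := by
      unfold pvK
      have : decide (((pvStepsP logs).length : Int) - 4 ≤ (i0 : Int) + 1) = true := by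
        rw [decide_eq_true_eq]
        omega
      rw [this]
      simp
    rw [hp0.2.1] at hk
    exact Bool.false_ne_true hk
  have hle : ¬ (pvStepsP logs).length ≤ 5 := by omega
  rw [if_neg hle, if_neg hle]
  have htake : (PySem.List.enumerate (pvStepsP logs)).take (pvStepsP logs).length
      = PySem.List.enumerate (pvStepsP logs) := by
    rw [show (pvStepsP logs).length = (PySem.List.enumerate (pvStepsP logs)).length from
      (PySem.List.length_enumerate _ _).symm]
    exact List.take_length ..
  have hshape : ∀ i, i < (pvStepsP logs).length →
      ∃ u, ((pvStepsP logs).getD i "").toList = ['S', 't', 'e', 'p', ' '] ++ u := by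
    intro i hi
    exact pv_shape logs i (by omega)
  have hmega := pv_mega (pvStepsP logs) hshape (pvStepsP logs).length (by omega) (le_refl _)
  rw [pvFoldA, pvFoldB, htake] at hmega
  rcases hmega with ⟨_, _, _, hnp⟩ | ⟨_, segsA, hacc, hhA, hhB, hgap, hrel⟩
  · exact absurd hp0 (hnp i0 (by omega))
  · -- the final index is always kept, so both lists end in the same step and the gap survives
    have hKlast : pvK (pvStepsP logs)
        ((((pvStepsP logs).length - 1 : Nat) : Int), (pvStepsP logs).getD ((pvStepsP logs).length - 1) "") = true := by
      unfold pvK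
      have hdec : decide (((pvStepsP logs).length : Int) - 4
          ≤ (((pvStepsP logs).length - 1 : Nat) : Int)) = true := by
        rw [decide_eq_true_eq]
        omega
      rw [hdec]
      simp
    rcases hrel with ⟨preA, preB, s, hpA, hpB, hs⟩ | ⟨hKf, _⟩
    · rw [if_pos hKlast] at hs
      subst hs
      exact pv_out_ne _ _ _ _ hacc ⟨preA, hpA⟩ ⟨preB, hpB⟩ hhA hhB
        (hshape _ (by omega)) hgap
    · rw [hKlast] at hKf
      exact absurd hKf.symm Bool.false_ne_true

theorem get_truncated_prev_reasoning_changed : Claim_changed_get_truncated_prev_reasoning := by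
  unfold Claim_changed_get_truncated_prev_reasoning
  refine ⟨by decide, by decide, by decide, by decide, by decide, by decide⟩
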